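-- pv_equiv track=rewrite | github.com/isaacnfairplay/ducksite | ducksite/tuy_sql.py | _parse_model_blocks
-- ===== SOURCE A (Python) =====
-- from typing import Dict, List
--
-- def _parse_model_blocks(text: str) -> Dict[str, List[str]]:
--     blocks: Dict[str, List[str]] = {}
--     current: List[str] = []
--     current_name: str | None = None
--     for line in text.splitlines():
--         if line.strip().startswith("-- name:"):
--             if current_name is not None:
--                 blocks[current_name] = current
--             current_name = line.split(":", 1)[1].strip()
--             current = []
--         else:
--             current.append(line)
--     if current_name is not None:
--         blocks[current_name] = current
--     return blocks
-- ===== SOURCE B (Python) =====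
-- def _parse_model_blocks(text):
--     def is_header(line):
--         return line.strip().startswith("-- name:")
--
--     def chunks(lines):
--         # lines is empty or starts with a header line
--         if not lines:
--             return []
--         k = 1
--         while k < len(lines) and not is_header(lines[k]):
--             k += 1
--         name = lines[0].split(":", 1)[1].strip()
--         return [(name, lines[1:k])] + chunks(lines[k:])
--
--     lines = text.splitlines()
--     while lines and not is_header(lines[0]):
--         lines = lines[1:]
--     blocks = {}
--     for name, content in chunks(lines):
--         blocks[name] = content
--     return blocks
-- ===== Notes on version B (the rewrite author's own statement) =====
-- stated objective: alternative
-- what changed: Replaces A's single-pass fold carrying (blocks, current, current_name) mutable state with a stateless decomposition: drop the pre-header prelude, recursively cut the line list into (name, content) chunks at header lines, then build the dict in one fold over the chunks.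
import Mathlib
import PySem

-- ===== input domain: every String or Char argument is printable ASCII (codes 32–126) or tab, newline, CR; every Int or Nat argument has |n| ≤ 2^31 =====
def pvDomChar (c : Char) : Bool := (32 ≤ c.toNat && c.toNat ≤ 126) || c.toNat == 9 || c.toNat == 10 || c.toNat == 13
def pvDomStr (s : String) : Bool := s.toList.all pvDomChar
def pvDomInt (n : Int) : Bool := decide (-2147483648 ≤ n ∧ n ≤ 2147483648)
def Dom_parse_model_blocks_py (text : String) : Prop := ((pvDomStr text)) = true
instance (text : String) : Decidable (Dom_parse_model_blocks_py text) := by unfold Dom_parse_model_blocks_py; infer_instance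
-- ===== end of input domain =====

-- B replaces A's stateful accumulator fold by a stateless chunking recursion; objective: alternative decomposition, same cost.

-- ===== PORT A =====
-- shared subexpressions of both Pythons: line.strip().startswith("-- name:") and line.split(":",1)[1].strip()
def pvIsHeader (line : String) : Bool :=
  PySem.Str.startswith (PySem.Str.strip line) "-- name:"

-- the [1] index is always in range on the lines it is applied to (they contain ':'), so getD never fires
def pvNameOf (line : String) : String :=
  PySem.Str.strip ((PySem.List.pyGet? ((PySem.Str.splitMax? line ":" 1).getD []) 1).getD "")

def pvStepA (st : PySem.Dict String (List String) × List String × Option String)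
    (line : String) : PySem.Dict String (List String) × List String × Option String :=
  if pvIsHeader line then
    (match st.2.2 with
     | some n => st.1.insert n st.2.1
     | none => st.1, [], some (pvNameOf line))
  else
    (st.1, st.2.1 ++ [line], st.2.2)

def parse_model_blocks_py (text : String) : List (String × List String) :=
  let st := (PySem.Str.splitlines text).foldl pvStepA (PySem.Dict.empty, [], none)
  (match st.2.2 with
   | some n => st.1.insert n st.2.1
   | none => st.1).items

-- ===== PORT B =====
-- chunks: lines[1:k] / lines[k:] with k = index of the first header in lines[1:], i.e. takeWhile / dropWhile on the tail
def pvChunksB : List String → List (String × List String)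
  | [] => []
  | l :: rest =>
    (pvNameOf l, rest.takeWhile (fun x => !pvIsHeader x)) ::
      pvChunksB (rest.dropWhile (fun x => !pvIsHeader x))
termination_by lines => lines.length
decreasing_by
  exact Nat.lt_succ_of_le (List.length_dropWhile_le _ _)

def parse_model_blocks_py_alt (text : String) : List (String × List String) :=
  let lines := (PySem.Str.splitlines text).dropWhile (fun l => !pvIsHeader l)
  ((pvChunksB lines).foldl (fun d p => d.insert p.1 p.2) PySem.Dict.empty).items

-- ===== PRECONDITION & SPEC =====
def Spec_parse_model_blocks_py (text : String) (out : List (String × List String)) : Prop := out = parse_model_blocks_py_alt text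
instance (text : String) (out : List (String × List String)) : Decidable (Spec_parse_model_blocks_py text out) := by unfold Spec_parse_model_blocks_py; infer_instance

-- ===== CLAIM (what is proved, stated in full; the proofs are below) =====
def Claim_equal_parse_model_blocks_py : Prop := ∀ (text : String), Dom_parse_model_blocks_py text → Spec_parse_model_blocks_py text (parse_model_blocks_py text)

-- ===== LEMMAS AND PROOFS =====
-- finalize A's loop state: the trailing 'if current_name is not None'
def pvFin (st : PySem.Dict String (List String) × List String × Option String) :
    PySem.Dict String (List String) :=
  match st.2.2 with
  | some n => st.1.insert n st.2.1
  | none => st.1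

def pvIns (d : PySem.Dict String (List String)) (p : String × List String) :
    PySem.Dict String (List String) := d.insert p.1 p.2

-- A inside block (name, cur): finishing the fold inserts (name, cur ++ leading non-headers) then B's chunks of the rest
theorem pvLemSome (lines : List String) (d : PySem.Dict String (List String))
    (cur : List String) (n : String) :
    pvFin (lines.foldl pvStepA (d, cur, some n)) =
      ((n, cur ++ lines.takeWhile (fun x => !pvIsHeader x)) ::
        pvChunksB (lines.dropWhile (fun x => !pvIsHeader x))).foldl pvIns d := by
  induction lines generalizing d cur n with
  | nil => simp [pvFin, pvIns, pvChunksB]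
  | cons l t ih =>
    by_cases h : pvIsHeader l = true
    · simp [List.foldl, pvStepA, h, ih, pvChunksB, List.takeWhile, List.dropWhile, pvIns]
    · simp only [List.foldl, pvStepA, h, if_neg, Bool.not_eq_true, ih,
        List.takeWhile, List.dropWhile, Bool.not_false]
      simp [List.append_assoc]

-- A before any header: the prelude lines are discarded
theorem pvLemNone (lines : List String) (d : PySem.Dict String (List String))
    (cur : List String) :
    pvFin (lines.foldl pvStepA (d, cur, none)) =
      (pvChunksB (lines.dropWhile (fun x => !pvIsHeader x))).foldl pvIns d := by
  induction lines generalizing d cur with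
  | nil => simp [pvFin, pvChunksB]
  | cons l t ih =>
    by_cases h : pvIsHeader l = true
    · simp [List.foldl, pvStepA, h, pvLemSome, pvChunksB, List.dropWhile, pvIns]
    · simp [List.foldl, pvStepA, h, ih, List.dropWhile]

-- ===== VERDICT (by name: the statement is the Claim_ definition above) =====
theorem parse_model_blocks_py_spec : Claim_equal_parse_model_blocks_py := by
  intro text _
  unfold Spec_parse_model_blocks_py parse_model_blocks_py parse_model_blocks_py_alt
  have := pvLemNone (PySem.Str.splitlines text) PySem.Dict.empty []
  simp only [pvFin] at this
  simp only [this]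
  rfl
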